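-- pv_equiv track=rewrite | github.com/neonfuzz/prosestyler | grammar.py | fix_contractions
-- ===== SOURCE A (Python) =====
-- def fix_contractions(tokens):
--     """Treat contractions as one token, not three."""
--     cont_list = ['d', 'll', 'm', 're', 's', 't', 've']
--     conts = [i for i, tok in enumerate(tokens)
--              if tok == "'"
--              and i > 0 and i+1 < len(tokens)
--              and tokens[i+1] in cont_list]
--     for cont in conts[::-1]:
--         tokens = tokens[:cont-1] \
--                  + [''.join(tokens[cont-1:cont+2])] \
--                  + tokens[cont+2:]
--     plural_possess = [i for i, tok in enumerate(tokens)
--                       if tok == "'"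
--                       and i > 0 and i+1 < len(tokens)
--                       and tokens[i-1].endswith('s')
--                       and tokens[i+1] == ' ']
--     for plupos in plural_possess[::-1]:
--         tokens = tokens[:plupos-1] \
--                  + [''.join(tokens[plupos-1:plupos+1])] \
--                  + tokens[plupos+1:]
--     return tokens
-- ===== SOURCE B (Python) =====
-- def fix_contractions(tokens):
--     """Treat contractions as one token, not three."""
--     cont_set = {'d', 'll', 'm', 're', 's', 't', 've'}
--     n = len(tokens)
--     merged = []
--     i = 0
--     while i < n:
--         cur = tokens[i]
--         while i + 2 < n and tokens[i+1] == "'" and tokens[i+2] in cont_set: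
--             cur = cur + "'" + tokens[i+2]
--             i += 2
--         merged.append(cur)
--         i += 1
--     m = len(merged)
--     out = []
--     j = 0
--     while j < m:
--         cur = merged[j]
--         if j + 2 < m and merged[j+1] == "'" and merged[j+2] == ' ' and cur.endswith('s'):
--             cur = cur + "'"
--             j += 1
--         out.append(cur)
--         j += 1
--     return out
-- ===== Notes on version B (the rewrite author's own statement) =====
-- stated objective: alternative
-- what changed: A precomputes the apostrophe index lists with enumerate and then rebuilds the whole token list by slicing+concatenation once per merge (right-to-left); B makes two single left-to-right scans that merge qualifying contraction triples and possessive pairs inline while building each output list once.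
import Mathlib
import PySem

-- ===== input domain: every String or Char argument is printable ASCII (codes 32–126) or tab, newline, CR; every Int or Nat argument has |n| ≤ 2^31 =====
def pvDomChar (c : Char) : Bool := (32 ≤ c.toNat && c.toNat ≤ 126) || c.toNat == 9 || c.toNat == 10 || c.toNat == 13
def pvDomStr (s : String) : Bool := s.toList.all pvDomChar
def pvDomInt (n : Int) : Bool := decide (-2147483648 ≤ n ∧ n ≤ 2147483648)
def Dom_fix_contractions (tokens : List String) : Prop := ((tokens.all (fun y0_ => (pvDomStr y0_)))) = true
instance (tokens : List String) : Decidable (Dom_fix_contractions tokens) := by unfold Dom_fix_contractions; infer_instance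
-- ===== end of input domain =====

-- B replaces A's precomputed index lists + repeated whole-list slicing by two single
-- left-to-right scans that merge as they go; the return values are proved equal.

-- ===== PORT A =====
def contList : List String := ["d", "ll", "m", "re", "s", "t", "ve"]

-- condition of A's first comprehension, on an (index, token) pair from enumerate
def pvCond1 (t : List String) (p : Int × String) : Bool :=
  p.2 == "'" && decide (0 < p.1) && decide (p.1 + 1 < (t.length : Int))
    && contList.contains (PySem.List.pyGetD t (p.1 + 1) "")

-- tokens[:cont-1] + [''.join(tokens[cont-1:cont+2])] + tokens[cont+2:]
def pvMerge3 (ts : List String) (c : Int) : List String :=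
  PySem.List.slice ts none (some (c - 1))
    ++ [PySem.Str.join "" (PySem.List.slice ts (some (c - 1)) (some (c + 2)))]
    ++ PySem.List.slice ts (some (c + 2)) none

-- condition of A's second comprehension
def pvCond2 (t : List String) (p : Int × String) : Bool :=
  p.2 == "'" && decide (0 < p.1) && decide (p.1 + 1 < (t.length : Int))
    && PySem.Str.endswith (PySem.List.pyGetD t (p.1 - 1) "") "s"
    && (PySem.List.pyGetD t (p.1 + 1) "" == " ")

-- tokens[:plupos-1] + [''.join(tokens[plupos-1:plupos+1])] + tokens[plupos+1:]
def pvMerge2 (ts : List String) (c : Int) : List String :=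
  PySem.List.slice ts none (some (c - 1))
    ++ [PySem.Str.join "" (PySem.List.slice ts (some (c - 1)) (some (c + 1)))]
    ++ PySem.List.slice ts (some (c + 1)) none

def fix_contractions (tokens : List String) : List String :=
  let conts := ((PySem.List.enumerate tokens).filter (pvCond1 tokens)).map (·.1)
  -- conts[::-1] is conts.reverse (PySem.List.slice?_none_none_neg_one)
  let tokens1 := conts.reverse.foldl pvMerge3 tokens
  let plural := ((PySem.List.enumerate tokens1).filter (pvCond2 tokens1)).map (·.1)
  plural.reverse.foldl pvMerge2 tokens1

-- ===== PORT B =====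
-- Python 'str + str' (exact: code-point concatenation)
def pyAdd (s t : String) : String := String.ofList (s.toList ++ t.toList)

-- B's first while loop: cur is the token being built, the list argument what follows it
def fcScan1 (cur : String) : List String → List String
  | ap :: b :: rest =>
    if ap = "'" ∧ b ∈ contList then fcScan1 (pyAdd (pyAdd cur "'") b) rest
    else cur :: fcScan1 ap (b :: rest)
  | [x] => [cur, x]
  | [] => [cur]

-- B's second while loop
def fcScan2 (cur : String) : List String → List String
  | ap :: sp :: rest =>
    if ap = "'" ∧ sp = " " ∧ PySem.Str.endswith cur "s" then
      pyAdd cur "'" :: fcScan2 sp rest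
    else cur :: fcScan2 ap (sp :: rest)
  | [x] => [cur, x]
  | [] => [cur]

def fcPass1 : List String → List String
  | [] => []
  | t :: rest => fcScan1 t rest

def fcPass2 : List String → List String
  | [] => []
  | t :: rest => fcScan2 t rest

def fix_contractions_alt (tokens : List String) : List String :=
  fcPass2 (fcPass1 tokens)

-- ===== PRECONDITION & SPEC =====
def Spec_fix_contractions (tokens : List String) (out : List String) : Prop := out = fix_contractions_alt tokens
instance (tokens : List String) (out : List String) : Decidable (Spec_fix_contractions tokens out) := by unfold Spec_fix_contractions; infer_instance

-- ===== CLAIM (what is proved, stated in full; the proofs are below) =====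
def Claim_equal_fix_contractions : Prop := ∀ (tokens : List String), Dom_fix_contractions tokens → Spec_fix_contractions tokens (fix_contractions tokens)

-- ===== LEMMAS AND PROOFS =====

-- Nat-side reading of A's two comprehension conditions
def cond1 (t : List String) (i : Nat) : Bool :=
  decide (t.getD i "" = "'" ∧ 0 < i ∧ i + 1 < t.length ∧ t.getD (i + 1) "" ∈ contList)

def cond2 (t : List String) (i : Nat) : Bool :=
  decide (t.getD i "" = "'" ∧ 0 < i ∧ i + 1 < t.length
    ∧ PySem.Str.endswith (t.getD (i - 1) "") "s" = true ∧ t.getD (i + 1) "" = " ")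

def idxs1 (t : List String) : List Nat :=
  (List.range t.length).filter (cond1 t)

def idxs2 (t : List String) : List Nat :=
  (List.range t.length).filter (cond2 t)

-- Nat-side reading of A's merge step: window of k tokens starting at c-1
def stepN (k : Nat) (ts : List String) (c : Nat) : List String :=
  ts.take (c - 1) ++ [PySem.Str.join "" ((ts.drop (c - 1)).take k)] ++ ts.drop (c - 1 + k)

lemma conts_to_idxs1 (t : List String) :
    ((PySem.List.enumerate t).filter (pvCond1 t)).map (·.1)
      = (idxs1 t).map (Nat.cast : Nat → Int) := by
  have hen : PySem.List.enumerate t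
      = (List.range t.length).map
          (fun k => (((k : Nat) : Int), PySem.List.pyGetD t ((k : Nat) : Int) "")) := by
    rw [PySem.List.enumerate_eq_map_pyRange t ""]
    have hl : PySem.List.len t = (t.length : Int) := rfl
    rw [hl, PySem.List.pyRange_zero_natCast, List.map_map]
    rfl
  rw [hen, List.filter_map, List.map_map]
  unfold idxs1
  have hpred : (pvCond1 t ∘ fun k : Nat =>
      (((k : Nat) : Int), PySem.List.pyGetD t ((k : Nat) : Int) "")) = cond1 t := by
    funext k
    simp only [Function.comp_apply, pvCond1, cond1, PySem.List.pyGetD_natCast]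
    have h1 : ((k : Int) + 1) = ((k + 1 : Nat) : Int) := by push_cast; ring
    rw [h1, PySem.List.pyGetD_natCast]
    apply Bool.eq_iff_iff.mpr
    simp only [Bool.and_eq_true, beq_iff_eq, decide_eq_true_eq, List.contains_iff_mem]
    constructor
    · rintro ⟨⟨⟨a, b⟩, c⟩, d⟩
      exact ⟨a, by exact_mod_cast b, by exact_mod_cast c, d⟩
    · rintro ⟨a, b, c, d⟩
      exact ⟨⟨⟨a, by exact_mod_cast b⟩, by exact_mod_cast c⟩, d⟩
  rw [hpred]
  exact List.map_congr_left (fun k _ => rfl)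

lemma conts_to_idxs2 (t : List String) :
    ((PySem.List.enumerate t).filter (pvCond2 t)).map (·.1)
      = (idxs2 t).map (Nat.cast : Nat → Int) := by
  have hen : PySem.List.enumerate t
      = (List.range t.length).map
          (fun k => (((k : Nat) : Int), PySem.List.pyGetD t ((k : Nat) : Int) "")) := by
    rw [PySem.List.enumerate_eq_map_pyRange t ""]
    have hl : PySem.List.len t = (t.length : Int) := rfl
    rw [hl, PySem.List.pyRange_zero_natCast, List.map_map]
    rfl
  rw [hen, List.filter_map, List.map_map]
  unfold idxs2
  have hpred : (pvCond2 t ∘ fun k : Nat =>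
      (((k : Nat) : Int), PySem.List.pyGetD t ((k : Nat) : Int) "")) = cond2 t := by
    funext k
    simp only [Function.comp_apply, pvCond2, cond2, PySem.List.pyGetD_natCast]
    have h1 : ((k : Int) + 1) = ((k + 1 : Nat) : Int) := by push_cast; ring
    rw [h1, PySem.List.pyGetD_natCast]
    apply Bool.eq_iff_iff.mpr
    simp only [Bool.and_eq_true, beq_iff_eq, decide_eq_true_eq]
    constructor
    · rintro ⟨⟨⟨⟨a, b⟩, c⟩, d⟩, e⟩
      have hk : 0 < k := by exact_mod_cast b
      refine ⟨a, hk, by exact_mod_cast c, ?_, e⟩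
      rwa [show ((k : Int) - 1) = ((k - 1 : Nat) : Int) by omega,
        PySem.List.pyGetD_natCast] at d
    · rintro ⟨a, b, c, d, e⟩
      refine ⟨⟨⟨⟨a, by exact_mod_cast b⟩, by exact_mod_cast c⟩, ?_⟩, e⟩
      rwa [show ((k : Int) - 1) = ((k - 1 : Nat) : Int) by omega,
        PySem.List.pyGetD_natCast]
  rw [hpred]
  exact List.map_congr_left (fun k _ => rfl)

lemma mem_idxs1_pos {t : List String} {i : Nat} (h : i ∈ idxs1 t) : 1 ≤ i := by
  simp only [idxs1, cond1, List.mem_filter, decide_eq_true_eq] at h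
  exact h.2.2.1

lemma mem_idxs2_pos {t : List String} {i : Nat} (h : i ∈ idxs2 t) : 1 ≤ i := by
  simp only [idxs2, cond2, List.mem_filter, decide_eq_true_eq] at h
  exact h.2.2.1

lemma pvMerge3_cast (ts : List String) (c : Nat) (hc : 1 ≤ c) :
    pvMerge3 ts (c : Int) = stepN 3 ts c := by
  obtain ⟨d, rfl⟩ : ∃ d, c = d + 1 := ⟨c - 1, by omega⟩
  unfold pvMerge3 stepN
  have h1 : ((d + 1 : Nat) : Int) - 1 = ((d : Nat) : Int) := by push_cast; ring
  have h2 : ((d + 1 : Nat) : Int) + 2 = ((d + 3 : Nat) : Int) := by push_cast; ring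
  rw [h1, h2, PySem.List.slice_to_natCast, PySem.List.slice_natCast,
    PySem.List.slice_from_natCast]
  have h3 : d + 3 - d = 3 := by omega
  have h4 : d + 1 - 1 = d := by omega
  rw [h3, h4]

lemma pvMerge2_cast (ts : List String) (c : Nat) (hc : 1 ≤ c) :
    pvMerge2 ts (c : Int) = stepN 2 ts c := by
  obtain ⟨d, rfl⟩ : ∃ d, c = d + 1 := ⟨c - 1, by omega⟩
  unfold pvMerge2 stepN
  have h1 : ((d + 1 : Nat) : Int) - 1 = ((d : Nat) : Int) := by push_cast; ring
  have h2 : ((d + 1 : Nat) : Int) + 1 = ((d + 2 : Nat) : Int) := by push_cast; ring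
  rw [h1, h2, PySem.List.slice_to_natCast, PySem.List.slice_natCast,
    PySem.List.slice_from_natCast]
  have h3 : d + 2 - d = 2 := by omega
  have h4 : d + 1 - 1 = d := by omega
  rw [h3, h4]

lemma foldl_cast3 (l : List Nat) (h : ∀ c ∈ l, 1 ≤ c) (ts : List String) :
    (l.map (Nat.cast : Nat → Int)).foldl pvMerge3 ts = l.foldl (stepN 3) ts := by
  induction l generalizing ts with
  | nil => rfl
  | cons c l ih =>
    simp only [List.map_cons, List.foldl_cons]
    rw [pvMerge3_cast ts c (h c (by simp))]
    exact ih (fun x hx => h x (by simp [hx])) _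

lemma foldl_cast2 (l : List Nat) (h : ∀ c ∈ l, 1 ≤ c) (ts : List String) :
    (l.map (Nat.cast : Nat → Int)).foldl pvMerge2 ts = l.foldl (stepN 2) ts := by
  induction l generalizing ts with
  | nil => rfl
  | cons c l ih =>
    simp only [List.map_cons, List.foldl_cons]
    rw [pvMerge2_cast ts c (h c (by simp))]
    exact ih (fun x hx => h x (by simp [hx])) _

lemma stepN_cons (k : Nat) (a : String) (ts : List String) (c : Nat) (hc : 1 ≤ c) :
    stepN k (a :: ts) (c + 1) = a :: stepN k ts c := by
  obtain ⟨d, rfl⟩ : ∃ d, c = d + 1 := ⟨c - 1, by omega⟩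
  unfold stepN
  have h4 : d + 1 + 1 - 1 = d + 1 := by omega
  have h5 : d + 1 - 1 = d := by omega
  rw [h4, h5, List.take_succ_cons, List.drop_succ_cons]
  have h6 : d + 1 + k = (d + k) + 1 := by omega
  rw [h6, List.drop_succ_cons]
  simp

lemma foldl_shift (k : Nat) (a : String) (l : List Nat) (h : ∀ c ∈ l, 1 ≤ c)
    (ts : List String) :
    (l.map (· + 1)).foldl (stepN k) (a :: ts) = a :: l.foldl (stepN k) ts := by
  induction l generalizing ts with
  | nil => rfl
  | cons c l ih =>
    simp only [List.map_cons, List.foldl_cons]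
    rw [stepN_cons k a ts c (h c (by simp))]
    exact ih (fun x hx => h x (by simp [hx])) _

lemma foldl_shift2 (k : Nat) (a a' : String) (l : List Nat) (h : ∀ c ∈ l, 1 ≤ c)
    (ts : List String) :
    (l.map (· + 2)).foldl (stepN k) (a :: a' :: ts) = a :: a' :: l.foldl (stepN k) ts := by
  have hmap : l.map (· + 2) = (l.map (· + 1)).map (· + 1) := by
    rw [List.map_map]
    exact List.map_congr_left (fun x _ => by simp [Function.comp_apply]; try omega)
  rw [hmap, foldl_shift k a _ (by intro c hc; simp only [List.mem_map] at hc; obtain ⟨a, _, rfl⟩ := hc; omega),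
    foldl_shift k a' l h]

lemma range_add_two (n : Nat) :
    List.range (n + 2) = 0 :: 1 :: (List.range n).map (· + 2) := by
  simp only [List.range_succ_eq_map, List.map_cons, List.map_map, List.cons.injEq, true_and]
  exact List.map_congr_left (fun x _ => by simp [Function.comp_apply]; try omega)

lemma idxs1_merge (a b : String) (rest : List String) (hb : b ∈ contList) :
    idxs1 (a :: "'" :: b :: rest) = 1 :: (idxs1 (b :: rest)).map (· + 2) := by
  have hbne : b ≠ "'" := by rintro rfl; revert hb; decide
  unfold idxs1
  have hlen : (a :: "'" :: b :: rest).length = (b :: rest).length + 2 := by simp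
  rw [hlen, List.length_cons, range_add_two]
  rw [List.filter_cons_of_neg (by simp [cond1]),
    List.filter_cons_of_pos (by
      simp only [cond1, decide_eq_true_eq]
      exact ⟨rfl, by omega, by simp only [List.length_cons]; omega, hb⟩),
    List.filter_map]
  refine congrArg _ (congrArg _ (List.filter_congr ?_))
  intro i hi
  simp only [List.mem_range] at hi
  apply Bool.eq_iff_iff.mpr
  simp only [Function.comp_apply, cond1, decide_eq_true_eq]
  by_cases hi0 : i = 0
  · subst hi0
    constructor
    · rintro ⟨h1, -, -, -⟩; exact absurd h1 hbne
    · rintro ⟨-, h2, -, -⟩; omega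
  · obtain ⟨j, rfl⟩ : ∃ j, i = j + 1 := ⟨i - 1, by omega⟩
    constructor
    · rintro ⟨h1, h2, h3, h4⟩
      simp only [List.length_cons] at h3
      exact ⟨h1, by omega, by simp only [List.length_cons]; omega, h4⟩
    · rintro ⟨h1, h2, h3, h4⟩
      simp only [List.length_cons] at h3
      exact ⟨h1, by omega, by simp only [List.length_cons]; omega, h4⟩

lemma idxs1_nomerge (a : String) (rest : List String)
    (h : ∀ b r2, rest = "'" :: b :: r2 → b ∉ contList) :
    idxs1 (a :: rest) = (idxs1 rest).map (· + 1) := by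
  unfold idxs1
  rw [List.length_cons, List.range_succ_eq_map]
  rw [List.filter_cons_of_neg (by simp [cond1]), List.filter_map]
  have hflt : List.filter (cond1 (a :: rest) ∘ Nat.succ) (List.range rest.length)
      = List.filter (cond1 rest) (List.range rest.length) := by
    apply List.filter_congr
    intro i hi
    simp only [List.mem_range] at hi
    apply Bool.eq_iff_iff.mpr
    simp only [Function.comp_apply, cond1, decide_eq_true_eq, Nat.succ_eq_add_one]
    by_cases hi0 : i = 0
    · subst hi0
      constructor
      · rintro ⟨h1, -, h3, h4⟩
        simp only [List.length_cons] at h3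
        rcases rest with _ | ⟨r0, _ | ⟨r1, r2⟩⟩
        · simp at h3
        · simp at h3
        · exact absurd h4 (h r1 r2 (by rw [show r0 = "'" from h1]))
      · rintro ⟨-, h2, -, -⟩; omega
    · obtain ⟨j, rfl⟩ : ∃ j, i = j + 1 := ⟨i - 1, by omega⟩
      constructor
      · rintro ⟨h1, h2, h3, h4⟩
        simp only [List.length_cons] at h3
        exact ⟨h1, by omega, by omega, h4⟩
      · rintro ⟨h1, h2, h3, h4⟩
        exact ⟨h1, by omega, by simp only [List.length_cons]; omega, h4⟩
  rw [hflt]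

lemma idxs2_merge (a : String) (rest : List String)
    (ha : PySem.Str.endswith a "s" = true) :
    idxs2 (a :: "'" :: " " :: rest) = 1 :: (idxs2 (" " :: rest)).map (· + 2) := by
  unfold idxs2
  have hlen : (a :: "'" :: " " :: rest).length = (" " :: rest).length + 2 := by simp
  rw [hlen, List.length_cons, range_add_two]
  rw [List.filter_cons_of_neg (by simp [cond2]),
    List.filter_cons_of_pos (by
      simp only [cond2, decide_eq_true_eq]
      exact ⟨rfl, by omega, by simp only [List.length_cons]; omega, ha, rfl⟩),
    List.filter_map]
  refine congrArg _ (congrArg _ (List.filter_congr ?_))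
  intro i hi
  simp only [List.mem_range] at hi
  apply Bool.eq_iff_iff.mpr
  simp only [Function.comp_apply, cond2, decide_eq_true_eq]
  by_cases hi0 : i = 0
  · subst hi0
    constructor
    · rintro ⟨h1, -, -, -⟩; exact absurd (show (" " : String) = "'" from h1) (by decide)
    · rintro ⟨-, h2, -, -⟩; omega
  · obtain ⟨j, rfl⟩ : ∃ j, i = j + 1 := ⟨i - 1, by omega⟩
    constructor
    · rintro ⟨h1, h2, h3, h4, h5⟩
      simp only [List.length_cons] at h3
      exact ⟨h1, by omega, by simp only [List.length_cons]; omega, h4, h5⟩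
    · rintro ⟨h1, h2, h3, h4, h5⟩
      simp only [List.length_cons] at h3
      exact ⟨h1, by omega, by simp only [List.length_cons]; omega, h4, h5⟩

lemma idxs2_nomerge (a : String) (rest : List String)
    (h : ∀ r2, rest = "'" :: " " :: r2 → PySem.Str.endswith a "s" = false) :
    idxs2 (a :: rest) = (idxs2 rest).map (· + 1) := by
  unfold idxs2
  rw [List.length_cons, List.range_succ_eq_map]
  rw [List.filter_cons_of_neg (by simp [cond2]), List.filter_map]
  have hflt : List.filter (cond2 (a :: rest) ∘ Nat.succ) (List.range rest.length)
      = List.filter (cond2 rest) (List.range rest.length) := by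
    apply List.filter_congr
    intro i hi
    simp only [List.mem_range] at hi
    apply Bool.eq_iff_iff.mpr
    simp only [Function.comp_apply, cond2, decide_eq_true_eq, Nat.succ_eq_add_one]
    by_cases hi0 : i = 0
    · subst hi0
      constructor
      · rintro ⟨h1, -, h3, h4, h5⟩
        simp only [List.length_cons] at h3
        rcases rest with _ | ⟨r0, _ | ⟨r1, r2⟩⟩
        · simp at h3
        · simp at h3
        · have h4' : PySem.Str.endswith a "s" = true := h4
          have hfalse : PySem.Str.endswith a "s" = false :=
            h r2 (by rw [show r0 = "'" from h1, show r1 = " " from h5])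
          exact (Bool.false_ne_true (hfalse.symm.trans h4')).elim
      · rintro ⟨-, h2, -, -⟩; omega
    · obtain ⟨j, rfl⟩ : ∃ j, i = j + 1 := ⟨i - 1, by omega⟩
      constructor
      · rintro ⟨h1, h2, h3, h4, h5⟩
        simp only [List.length_cons] at h3
        exact ⟨h1, by omega, by omega, h4, h5⟩
      · rintro ⟨h1, h2, h3, h4, h5⟩
        exact ⟨h1, by omega, by simp only [List.length_cons]; omega, h4, h5⟩
  rw [hflt]

lemma pyAdd_assoc (x y z : String) : pyAdd (pyAdd x y) z = pyAdd x (pyAdd y z) := by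
  apply String.toList_inj.mp
  simp [pyAdd]

lemma join2 (x y : String) : PySem.Str.join "" [x, y] = pyAdd x y := by
  apply String.toList_inj.mp
  simp [pyAdd, PySem.Str.toList_join, PySem.Chars.join_cons_cons]

lemma join3 (x y z : String) :
    PySem.Str.join "" [x, y, z] = pyAdd (pyAdd x y) z := by
  apply String.toList_inj.mp
  simp [pyAdd, PySem.Str.toList_join, PySem.Chars.join_cons_cons]

lemma fcScan1_ne_nil : ∀ (l : List String) (cur : String), fcScan1 cur l ≠ [] := by
  have key : ∀ (n : Nat) (l : List String), l.length ≤ n → ∀ cur, fcScan1 cur l ≠ [] := by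
    intro n
    induction n with
    | zero =>
      intro l hl cur
      match l with
      | [] => simp [fcScan1]
      | x :: r => simp at hl
    | succ n ih =>
      intro l hl cur
      match l with
      | [] => simp [fcScan1]
      | [x] => simp [fcScan1]
      | ap :: b :: rest =>
        simp only [fcScan1]
        split_ifs with h
        · exact ih rest (by simp at hl ⊢; omega) _
        · simp
  exact fun l cur => key l.length l le_rfl cur

lemma scan1_pre : ∀ (l : List String) (cur pre : String),
    fcScan1 (pyAdd pre cur) l
      = pyAdd pre ((fcScan1 cur l).headD "") :: (fcScan1 cur l).tail := by
  have key : ∀ (n : Nat) (l : List String), l.length ≤ n → ∀ cur pre,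
      fcScan1 (pyAdd pre cur) l
        = pyAdd pre ((fcScan1 cur l).headD "") :: (fcScan1 cur l).tail := by
    intro n
    induction n with
    | zero =>
      intro l hl cur pre
      match l with
      | [] => simp [fcScan1]
      | x :: r => simp at hl
    | succ n ih =>
      intro l hl cur pre
      match l with
      | [] => simp [fcScan1]
      | [x] => simp [fcScan1]
      | ap :: b :: rest =>
        simp only [fcScan1]
        split_ifs with h
        · rw [pyAdd_assoc pre cur "'", pyAdd_assoc pre (pyAdd cur "'") b]
          exact ih rest (by simp at hl ⊢; omega) _ pre
        · simp
  exact fun l cur pre => key l.length l le_rfl cur pre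

lemma idxs1_nil_one_two (t : List String) (ht : t.length ≤ 2) : idxs1 t = [] := by
  unfold idxs1
  rw [List.filter_eq_nil_iff]
  intro i hi
  simp only [List.mem_range] at hi
  simp only [cond1, decide_eq_true_eq]
  rintro ⟨-, h2, h3, -⟩
  omega

lemma idxs2_nil_one_two (t : List String) (ht : t.length ≤ 2) : idxs2 t = [] := by
  unfold idxs2
  rw [List.filter_eq_nil_iff]
  intro i hi
  simp only [List.mem_range] at hi
  simp only [cond2, decide_eq_true_eq]
  rintro ⟨-, h2, h3, -⟩
  omega

lemma scan1_main : ∀ (rest : List String) (cur : String),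
    (idxs1 (cur :: rest)).reverse.foldl (stepN 3) (cur :: rest) = fcScan1 cur rest := by
  have key : ∀ (n : Nat) (rest : List String), rest.length ≤ n → ∀ cur,
      (idxs1 (cur :: rest)).reverse.foldl (stepN 3) (cur :: rest) = fcScan1 cur rest := by
    intro n
    induction n with
    | zero =>
      intro rest hl cur
      match rest with
      | [] => rw [idxs1_nil_one_two _ (by simp)]; simp [fcScan1]
      | x :: r => simp at hl
    | succ n ih =>
      intro rest hl cur
      match rest with
      | [] => rw [idxs1_nil_one_two _ (by simp)]; simp [fcScan1]
      | [x] => rw [idxs1_nil_one_two _ (by simp)]; simp [fcScan1]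
      | ap :: b :: r2 =>
        by_cases hm : ap = "'" ∧ b ∈ contList
        · obtain ⟨rfl, hb⟩ := hm
          rw [idxs1_merge cur b r2 hb, List.reverse_cons, ← List.map_reverse,
            List.foldl_append,
            foldl_shift2 3 cur "'" _
              (fun c hc => mem_idxs1_pos (List.mem_reverse.mp hc)) (b :: r2),
            ih r2 (by simp at hl; omega) b]
          obtain ⟨m, r, hmr⟩ : ∃ m r, fcScan1 b r2 = m :: r := by
            cases hx : fcScan1 b r2 with
            | nil => exact absurd hx (fcScan1_ne_nil _ _)
            | cons m r => exact ⟨m, r, rfl⟩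
          rw [hmr]
          simp only [List.foldl_cons, List.foldl_nil]
          rw [show stepN 3 (cur :: "'" :: m :: r) 1
              = PySem.Str.join "" [cur, "'", m] :: r from rfl, join3]
          have hrhs : fcScan1 cur ("'" :: b :: r2) = fcScan1 (pyAdd (pyAdd cur "'") b) r2 := by
            simp only [fcScan1]; rw [if_pos ⟨trivial, hb⟩]
          rw [hrhs, scan1_pre r2 b (pyAdd cur "'"), hmr]
          rfl
        · have hno : ∀ b' r2', (ap :: b :: r2) = "'" :: b' :: r2' → b' ∉ contList := by
            intro b' r2' he hmem
            injection he with e1 e2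
            injection e2 with e2 e3
            exact hm ⟨e1, by rw [e2]; exact hmem⟩
          rw [idxs1_nomerge cur (ap :: b :: r2) hno, ← List.map_reverse,
            foldl_shift 3 cur _
              (fun c hc => mem_idxs1_pos (List.mem_reverse.mp hc)) (ap :: b :: r2),
            ih (b :: r2) (by simp at hl ⊢; omega) ap]
          simp only [fcScan1]
          rw [if_neg hm]
  exact fun rest cur => key rest.length rest le_rfl cur

lemma scan2_main : ∀ (rest : List String) (cur : String),
    (idxs2 (cur :: rest)).reverse.foldl (stepN 2) (cur :: rest) = fcScan2 cur rest := by
  have key : ∀ (n : Nat) (rest : List String), rest.length ≤ n → ∀ cur,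
      (idxs2 (cur :: rest)).reverse.foldl (stepN 2) (cur :: rest) = fcScan2 cur rest := by
    intro n
    induction n with
    | zero =>
      intro rest hl cur
      match rest with
      | [] => rw [idxs2_nil_one_two _ (by simp)]; simp [fcScan2]
      | x :: r => simp at hl
    | succ n ih =>
      intro rest hl cur
      match rest with
      | [] => rw [idxs2_nil_one_two _ (by simp)]; simp [fcScan2]
      | [x] => rw [idxs2_nil_one_two _ (by simp)]; simp [fcScan2]
      | ap :: sp :: r2 =>
        by_cases hm : ap = "'" ∧ sp = " " ∧ PySem.Str.endswith cur "s"
        · obtain ⟨rfl, rfl, hs⟩ := hm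
          rw [idxs2_merge cur r2 hs, List.reverse_cons, ← List.map_reverse,
            List.foldl_append,
            foldl_shift2 2 cur "'" _
              (fun c hc => mem_idxs2_pos (List.mem_reverse.mp hc)) (" " :: r2),
            ih r2 (by simp at hl; omega) " "]
          simp only [List.foldl_cons, List.foldl_nil]
          rw [show stepN 2 (cur :: "'" :: fcScan2 " " r2) 1
              = PySem.Str.join "" [cur, "'"] :: fcScan2 " " r2 from rfl, join2]
          simp only [fcScan2]
          rw [if_pos ⟨trivial, trivial, hs⟩]
        · have hno : ∀ r2', (ap :: sp :: r2) = "'" :: " " :: r2'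
              → PySem.Str.endswith cur "s" = false := by
            intro r2' he
            injection he with e1 e2
            injection e2 with e2 e3
            cases hx : PySem.Str.endswith cur "s" with
            | false => rfl
            | true => exact absurd ⟨e1, e2, hx⟩ hm
          rw [idxs2_nomerge cur (ap :: sp :: r2) hno, ← List.map_reverse,
            foldl_shift 2 cur _
              (fun c hc => mem_idxs2_pos (List.mem_reverse.mp hc)) (ap :: sp :: r2),
            ih (sp :: r2) (by simp at hl ⊢; omega) ap]
          simp only [fcScan2]
          rw [if_neg hm]
  exact fun rest cur => key rest.length rest le_rfl cur

lemma pass1_eq (t : List String) :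
    ((((PySem.List.enumerate t).filter (pvCond1 t)).map (·.1)).reverse).foldl pvMerge3 t
      = fcPass1 t := by
  rw [conts_to_idxs1, ← List.map_reverse,
    foldl_cast3 _ (fun c hc => mem_idxs1_pos (List.mem_reverse.mp hc))]
  cases t with
  | nil => simp [idxs1, fcPass1]
  | cons cur rest => exact scan1_main rest cur

lemma pass2_eq (t : List String) :
    ((((PySem.List.enumerate t).filter (pvCond2 t)).map (·.1)).reverse).foldl pvMerge2 t
      = fcPass2 t := by
  rw [conts_to_idxs2, ← List.map_reverse,
    foldl_cast2 _ (fun c hc => mem_idxs2_pos (List.mem_reverse.mp hc))]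
  cases t with
  | nil => simp [idxs2, fcPass2]
  | cons cur rest => exact scan2_main rest cur

-- ===== VERDICT (by name: the statement is the Claim_ definition above) =====
theorem fix_contractions_spec : Claim_equal_fix_contractions := by
  unfold Claim_equal_fix_contractions
  intro tokens _
  unfold Spec_fix_contractions
  show fix_contractions tokens = fix_contractions_alt tokens
  simp only [fix_contractions, fix_contractions_alt]
  rw [pass1_eq, pass2_eq]
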